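-- pv_equiv track=rewrite | github.com/an920107/programming | OJ/tmp/gen3.py | solve
-- ===== SOURCE A (Python) =====
-- prize = (200000, 40000, 10000, 4000, 1000, 200)
--
-- def solve(input: list) -> int:
--     correct = []
--     invoice = []
--     flag = False
--     for elm in input:
--         if elm == ".":
--             flag = True
--             continue
--         if flag:
--             invoice.append(elm)
--             continue
--         else:
--             correct.append(elm)
--     sum = 0
--     for i in range(6):
--         for cor in correct:
--             to_remove = []
--             for inv in invoice:
--                 if cor == inv[i:]:
--                     sum += prize[i]
--                     to_remove.append(inv)
--             for rm in to_remove: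
--                 invoice.remove(rm)
--         correct = list(map(lambda s: s[1:], correct))
--     return sum
--
-- correct = []
--
-- invoice = []
--
-- sum = 0
-- ===== SOURCE B (Python) =====
-- prize = (200000, 40000, 10000, 4000, 1000, 200)
--
-- def solve(input: list) -> int:
--     if "." in input:
--         dot = input.index(".")
--     else:
--         dot = len(input)
--     correct = input[:dot]
--     active = [e for e in input[dot + 1:] if e != "."]
--     total = 0
--     for i in range(6):
--         keys = {cor[i:] for cor in correct}
--         won = [inv for inv in active if inv[i:] in keys]
--         total += prize[i] * len(won)
--         active = [inv for inv in active if inv[i:] not in keys]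
--     return total
-- ===== Notes on version B (the rewrite author's own statement) =====
-- stated objective: faster
-- what changed: A scans every remaining invoice for every correct number in every round (and then removes matches one by one with list.remove); B splits the input once with list.index, builds one set of correct-number suffixes per round and counts/filters the invoices in a single pass over them, so the inner scan per correct number disappears.
import Mathlib
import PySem

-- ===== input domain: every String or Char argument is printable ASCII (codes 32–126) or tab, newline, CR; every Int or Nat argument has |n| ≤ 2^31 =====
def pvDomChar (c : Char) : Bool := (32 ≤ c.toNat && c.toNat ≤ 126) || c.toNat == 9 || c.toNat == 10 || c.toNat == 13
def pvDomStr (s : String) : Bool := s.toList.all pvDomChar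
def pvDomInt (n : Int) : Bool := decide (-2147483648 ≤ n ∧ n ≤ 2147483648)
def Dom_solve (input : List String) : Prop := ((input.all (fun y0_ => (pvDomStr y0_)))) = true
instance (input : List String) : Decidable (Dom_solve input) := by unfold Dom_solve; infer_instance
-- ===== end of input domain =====

-- B replaces A's per-round quadruple loop (each correct number scanned against every
-- invoice, with list.remove) by one suffix-set per round built from the correct numbers,
-- counting and filtering the invoices in a single pass: O(rounds·(C+I)) vs O(rounds·C·I).

-- shared module-level constant of both files
def prize : List Int := [200000, 40000, 10000, 4000, 1000, 200]

-- ===== PORT A =====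
-- first loop: 'for elm in input' building (correct, invoice, flag)
def pvParseStep (st : List String × List String × Bool) (elm : String) : List String × List String × Bool :=
  if elm = "." then (st.1, st.2.1, true)
  else if st.2.2 = true then (st.1, st.2.1 ++ [elm], st.2.2)
  else (st.1 ++ [elm], st.2.1, st.2.2)

-- innermost loop: 'for inv in invoice', state (sum, to_remove)
def pvInnerStep (i : Int) (cor : String) (st : Int × List String) (inv : String) : Int × List String :=
  if cor = PySem.Str.slice inv (some i) none then
    (st.1 + PySem.List.pyGetD prize i 0, st.2 ++ [inv])
  else st

-- 'invoice.remove(rm)' (always succeeds in A; getD keeps the list if absent)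
def pvRemoveStep (acc : List String) (rm : String) : List String :=
  (PySem.List.remove? acc rm).getD acc

-- body of 'for cor in correct', state (sum, invoice)
def pvCorStep (i : Int) (st : Int × List String) (cor : String) : Int × List String :=
  let r := st.2.foldl (pvInnerStep i cor) (st.1, ([] : List String))
  (r.1, r.2.foldl pvRemoveStep st.2)

-- body of 'for i in range(6)', state (sum, correct, invoice)
def pvRoundStep (st : Int × List String × List String) (i : Int) : Int × List String × List String :=
  let r := st.2.1.foldl (pvCorStep i) (st.1, st.2.2)
  (r.1, st.2.1.map (fun s => PySem.Str.slice s (some 1) none), r.2)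

def solve (input : List String) : Int :=
  let p := input.foldl pvParseStep ([], [], false)
  ((PySem.List.pyRange 0 6 1).foldl pvRoundStep (0, p.1, p.2.1)).1

-- ===== PORT B =====
-- body of B's 'for i in range(6)', state (total, active)
def pvAltRound (correct : List String) (st : Int × List String) (i : Int) : Int × List String :=
  let keys : PySem.Set String :=
    PySem.Set.ofList (correct.map (fun cor => PySem.Str.slice cor (some i) none))
  let won := st.2.filter (fun inv => PySem.Set.contains keys (PySem.Str.slice inv (some i) none))
  (st.1 + PySem.List.pyGetD prize i 0 * (won.length : Int),
   st.2.filter (fun inv => !PySem.Set.contains keys (PySem.Str.slice inv (some i) none)))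

def solve_alt (input : List String) : Int :=
  let dot : Int := if "." ∈ input then (((PySem.List.index? input ".").getD 0 : Nat) : Int)
                   else (input.length : Int)
  let correct := PySem.List.slice input none (some dot)
  let active := (PySem.List.slice input (some (dot + 1)) none).filter (fun e => !(e == "."))
  ((PySem.List.pyRange 0 6 1).foldl (pvAltRound correct) (0, active)).1

-- ===== PRECONDITION & SPEC =====
def Spec_solve (input : List String) (out : Int) : Prop := out = solve_alt input
instance (input : List String) (out : Int) : Decidable (Spec_solve input out) := by unfold Spec_solve; infer_instance

-- ===== CLAIM (what is proved, stated in full; the proofs are below) =====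
def Claim_equal_solve : Prop := ∀ (input : List String), Dom_solve input → Spec_solve input (solve input)

-- ===== LEMMAS AND PROOFS =====

-- abbreviation for the Python suffix s[i:] (proof-side only)
def pvSfx (i : Int) (s : String) : String := PySem.Str.slice s (some i) none

theorem pvSfx_natCast (i : Nat) (s : String) : (pvSfx (i : Int) s).toList = s.toList.drop i := by
  simp [pvSfx, PySem.Str.toList_slice, PySem.List.slice_from_natCast]

theorem pvSfx_zero (s : String) : pvSfx 0 s = s := by
  have h := pvSfx_natCast 0 s
  rw [Nat.cast_zero] at h
  rw [← String.toList_inj, h, List.drop_zero]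

theorem pvSfx_sfx (i : Nat) (s : String) : pvSfx 1 (pvSfx (i : Int) s) = pvSfx ((i : Int) + 1) s := by
  have h1 := pvSfx_natCast 1 (pvSfx (i : Int) s)
  rw [Nat.cast_one] at h1
  rw [← String.toList_inj, h1, pvSfx_natCast i s,
      show ((i : Int) + 1) = ((i + 1 : Nat) : Int) by push_cast; ring, pvSfx_natCast (i + 1) s,
      List.drop_drop]

theorem pvMap_sfx_zero (l : List String) : l.map (pvSfx 0) = l := by
  rw [show pvSfx 0 = id from funext pvSfx_zero, List.map_id]

theorem pvMap_sfx_succ (i : Nat) (l : List String) :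
    (l.map (pvSfx (i : Int))).map (fun s => PySem.Str.slice s (some 1) none)
      = l.map (pvSfx ((i : Int) + 1)) := by
  rw [List.map_map]
  apply List.map_congr_left
  intro s _
  exact pvSfx_sfx i s

theorem pvMap_sfx_succ' (i : Int) (hi : 0 ≤ i) (l : List String) :
    (l.map (pvSfx i)).map (fun s => PySem.Str.slice s (some 1) none) = l.map (pvSfx (i + 1)) := by
  obtain ⟨n, rfl⟩ := Int.eq_ofNat_of_zero_le hi
  exact pvMap_sfx_succ n l

-- ---- parsing ----

theorem pvParseStep_dot (st : List String × List String × Bool) :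
    pvParseStep st "." = (st.1, st.2.1, true) := by simp [pvParseStep]

theorem pvParseStep_t (elm : String) (c v : List String) (h : elm ≠ ".") :
    pvParseStep (c, v, true) elm = (c, v ++ [elm], true) := by simp [pvParseStep, h]

theorem pvParseStep_f (elm : String) (c v : List String) (h : elm ≠ ".") :
    pvParseStep (c, v, false) elm = (c ++ [elm], v, false) := by simp [pvParseStep, h]

theorem pvParse_true (l : List String) (c v : List String) :
    l.foldl pvParseStep (c, v, true) = (c, v ++ l.filter (fun e => !(e == ".")), true) := by
  induction l generalizing v with
  | nil => simp
  | cons h t ih =>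
    by_cases hd : h = "."
    · subst hd
      rw [List.foldl_cons, pvParseStep_dot]
      simpa using ih v
    · rw [List.foldl_cons, pvParseStep_t h c v hd, ih (v ++ [h])]
      simp [hd]

theorem pvParse_shift (l : List String) (c v : List String) :
    l.foldl pvParseStep (c, v, false) =
      (c ++ (l.foldl pvParseStep ([], [], false)).1,
       v ++ (l.foldl pvParseStep ([], [], false)).2.1,
       (l.foldl pvParseStep ([], [], false)).2.2) := by
  induction l generalizing c v with
  | nil => simp
  | cons h t ih =>
    by_cases hd : h = "."
    · subst hd
      rw [List.foldl_cons, List.foldl_cons, pvParseStep_dot, pvParseStep_dot]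
      rw [pvParse_true t c v, pvParse_true t [] []]
      simp
    · rw [List.foldl_cons, List.foldl_cons, pvParseStep_f h c v hd, pvParseStep_f h [] [] hd,
          List.nil_append, ih (c ++ [h]) v, ih [h] []]
      simp

theorem pvParse_eq (input : List String) :
    (input.foldl pvParseStep ([], [], false)).1
        = PySem.List.slice input none (some (if "." ∈ input then (((PySem.List.index? input ".").getD 0 : Nat) : Int) else (input.length : Int)))
    ∧ (input.foldl pvParseStep ([], [], false)).2.1
        = (PySem.List.slice input (some ((if "." ∈ input then (((PySem.List.index? input ".").getD 0 : Nat) : Int) else (input.length : Int)) + 1)) none).filter (fun e => !(e == ".")) := by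
  induction input with
  | nil =>
    constructor <;> simp [PySem.List.slice]
  | cons h t ih =>
    by_cases hd : h = "."
    · subst hd
      rw [List.foldl_cons, pvParseStep_dot, pvParse_true t [] []]
      have hm : "." ∈ "." :: t := by simp
      rw [if_pos hm, PySem.List.index?_cons_self]
      constructor
      · rw [Option.getD_some, PySem.List.slice_to_natCast]
        simp
      · rw [Option.getD_some, show (((0 : Nat) : Int) + 1) = ((1 : Nat) : Int) by norm_num,
            PySem.List.slice_from_natCast]
        simp
    · have hmem : ("." ∈ h :: t) ↔ ("." ∈ t) := by simp [eq_comm, hd]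
      rw [List.foldl_cons, pvParseStep_f h [] [] hd, List.nil_append, pvParse_shift t [h] []]
      by_cases hdot : "." ∈ t
      · obtain ⟨k, hk⟩ := Option.isSome_iff_exists.1 ((PySem.List.index?_isSome_iff t ".").2 hdot)
        have hidx : PySem.List.index? (h :: t) "." = some (k + 1) := by
          rw [PySem.List.index?_cons_of_ne t hd, hk]; rfl
        rw [if_pos (hmem.2 hdot), hidx, Option.getD_some]
        constructor
        · rw [ih.1, if_pos hdot, hk, Option.getD_some,
              PySem.List.slice_to_natCast, PySem.List.slice_to_natCast]
          simp
        · rw [ih.2, if_pos hdot, hk, Option.getD_some,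
              show (((k + 1 : Nat) : Int) + 1) = ((k + 2 : Nat) : Int) by push_cast; ring,
              show (((k : Nat) : Int) + 1) = ((k + 1 : Nat) : Int) by push_cast; ring,
              PySem.List.slice_from_natCast, PySem.List.slice_from_natCast]
          rfl
      · rw [if_neg (fun hx => hdot (hmem.1 hx))]
        constructor
        · rw [ih.1, if_neg hdot, PySem.List.slice_to_natCast, PySem.List.slice_to_natCast]
          simp [List.take_of_length_le]
        · rw [ih.2, if_neg hdot,
              show (((h :: t).length : Int) + 1) = (((h :: t).length + 1 : Nat) : Int) by push_cast; ring,
              show ((t.length : Int) + 1) = ((t.length + 1 : Nat) : Int) by push_cast; ring,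
              PySem.List.slice_from_natCast, PySem.List.slice_from_natCast]
          simp [List.drop_eq_nil_of_le]

-- ---- the inner invoice scan of one correct number ----

theorem pvInner_eq (i : Int) (cor : String) (L : List String) (sum : Int) (tr : List String) :
    L.foldl (pvInnerStep i cor) (sum, tr) =
      (sum + PySem.List.pyGetD prize i 0 * (L.countP (fun inv => decide (cor = PySem.Str.slice inv (some i) none)) : Int),
       tr ++ L.filter (fun inv => decide (cor = PySem.Str.slice inv (some i) none))) := by
  induction L generalizing sum tr with
  | nil => simp
  | cons x xs ih =>
    by_cases hx : cor = PySem.Str.slice x (some i) none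
    · simp only [List.foldl_cons, pvInnerStep, if_pos hx, ih]
      rw [List.countP_cons, List.filter_cons]
      simp [hx]
      ring
    · simp only [List.foldl_cons, pvInnerStep, if_neg hx, ih]
      rw [List.countP_cons, List.filter_cons]
      simp [hx]

-- ---- removing the collected matches = filtering ----

theorem pvRemove_cons (p : String → Bool) (x : String) (hx : p x = false) :
    ∀ (tr : List String), (∀ rm ∈ tr, p rm = true) → ∀ (L : List String),
      tr.foldl pvRemoveStep (x :: L) = x :: tr.foldl pvRemoveStep L := by
  intro tr
  induction tr with
  | nil => intro _ L; simp
  | cons rm trs ih =>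
    intro h L
    have hrm : x ≠ rm := by
      intro he; rw [he] at hx; rw [h rm (by simp)] at hx; exact Bool.false_ne_true hx.symm
    have hstep : pvRemoveStep (x :: L) rm = x :: pvRemoveStep L rm := by
      unfold pvRemoveStep
      rw [PySem.List.remove?_cons_of_ne L hrm]
      cases PySem.List.remove? L rm <;> simp
    rw [List.foldl_cons, hstep, List.foldl_cons]
    exact ih (fun r hr => h r (by simp [hr])) (pvRemoveStep L rm)

theorem pvRemoveAll (p : String → Bool) : ∀ (L : List String),
    (L.filter p).foldl pvRemoveStep L = L.filter (fun x => !p x) := by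
  intro L
  induction L with
  | nil => simp
  | cons x xs ih =>
    by_cases hx : p x
    · rw [List.filter_cons_of_pos hx, List.foldl_cons]
      have hstep : pvRemoveStep (x :: xs) x = xs := by
        unfold pvRemoveStep; simp [PySem.List.remove?_cons_self]
      rw [hstep, ih, List.filter_cons_of_neg (by simp [hx])]
    · rw [List.filter_cons_of_neg hx,
          pvRemove_cons p x (by simp [hx]) _ (fun rm hrm => List.of_mem_filter hrm) xs, ih,
          List.filter_cons_of_pos (by simp [hx])]

-- ---- one step of A's 'for cor in correct' loop, in closed form ----

theorem pvCorStep_eq (i : Int) (sum : Int) (L : List String) (cor : String) :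
    pvCorStep i (sum, L) cor =
      (sum + PySem.List.pyGetD prize i 0 * (L.countP (fun inv => decide (cor = PySem.Str.slice inv (some i) none)) : Int),
       L.filter (fun inv => !decide (cor = PySem.Str.slice inv (some i) none))) := by
  unfold pvCorStep
  rw [pvInner_eq]
  simp only [List.nil_append]
  rw [pvRemoveAll]

-- countP/filter bookkeeping for processing one more correct number
theorem pvCount_split (i : Int) (c : String) (cs : List String) : ∀ (L : List String),
    L.countP (fun x => decide (c = PySem.Str.slice x (some i) none))
      + (L.filter (fun x => !decide (c = PySem.Str.slice x (some i) none))).countP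
          (fun x => decide (PySem.Str.slice x (some i) none ∈ cs))
      = L.countP (fun x => decide (PySem.Str.slice x (some i) none ∈ c :: cs)) := by
  intro L
  induction L with
  | nil => simp
  | cons x xs ih =>
    by_cases hc : c = PySem.Str.slice x (some i) none
    · rw [List.countP_cons_of_pos (by simpa using hc),
          List.filter_cons_of_neg (by simpa using hc),
          List.countP_cons_of_pos (by simp [List.mem_cons, hc.symm])]
      omega
    · by_cases hm : PySem.Str.slice x (some i) none ∈ cs
      · rw [List.countP_cons_of_neg (by simpa using hc),
            List.filter_cons_of_pos (by simpa using hc),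
            List.countP_cons_of_pos (by simpa using hm),
            List.countP_cons_of_pos (by simp [List.mem_cons, hm])]
        omega
      · rw [List.countP_cons_of_neg (by simpa using hc),
            List.filter_cons_of_pos (by simpa using hc),
            List.countP_cons_of_neg (by simpa using hm),
            List.countP_cons_of_neg (by
              simp only [List.mem_cons, decide_eq_true_eq, not_or]
              exact ⟨fun he => hc he.symm, hm⟩)]
        omega

theorem pvFilter_split (i : Int) (c : String) (cs : List String) (L : List String) :
    (L.filter (fun x => !decide (c = PySem.Str.slice x (some i) none))).filter
        (fun x => !decide (PySem.Str.slice x (some i) none ∈ cs))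
      = L.filter (fun x => !decide (PySem.Str.slice x (some i) none ∈ c :: cs)) := by
  rw [List.filter_filter]
  apply List.filter_congr
  intro x _
  by_cases hc : c = PySem.Str.slice x (some i) none
    <;> by_cases hm : PySem.Str.slice x (some i) none ∈ cs
    <;> simp [hc, hm, List.mem_cons, eq_comm]

-- ---- the whole 'for cor in correct' loop of one round ----

theorem pvCorLoop (i : Int) : ∀ (cs : List String) (sum : Int) (L : List String),
    cs.foldl (pvCorStep i) (sum, L) =
      (sum + PySem.List.pyGetD prize i 0 * (L.countP (fun inv => decide (PySem.Str.slice inv (some i) none ∈ cs)) : Int),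
       L.filter (fun inv => !decide (PySem.Str.slice inv (some i) none ∈ cs))) := by
  intro cs
  induction cs with
  | nil => intro sum L; simp
  | cons c cst ih =>
    intro sum L
    rw [List.foldl_cons, pvCorStep_eq, ih]
    simp only [Prod.mk.injEq]
    refine ⟨?_, pvFilter_split i c cst L⟩
    rw [← pvCount_split i c cst L]
    push_cast
    ring

-- decide-membership versus PySem.Set.contains on the deduplicated key set
theorem pvContains_eq (m : List String) (x : String) :
    decide (x ∈ m) = PySem.Set.contains (PySem.Set.ofList m) x := by
  by_cases h : x ∈ m
  · rw [(PySem.Set.contains_iff _ _).2 ((PySem.Set.mem_ofList m x).2 h), decide_eq_true h]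
  · simp only [h, decide_false]
    cases hc : PySem.Set.contains (PySem.Set.ofList m) x
    · rfl
    · exact absurd ((PySem.Set.mem_ofList m x).1 ((PySem.Set.contains_iff _ _).1 hc)) h

-- ---- one round of A = one round of B (plus the truncation invariant) ----

theorem pvRound_eq (i : Int) (hi : 0 ≤ i) (origC L : List String) (sum : Int) :
    pvRoundStep (sum, origC.map (pvSfx i), L) i =
      ((pvAltRound origC (sum, L) i).1,
       origC.map (pvSfx (i + 1)),
       (pvAltRound origC (sum, L) i).2) := by
  have hfun : origC.map (fun cor => PySem.Str.slice cor (some i) none)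
      = origC.map (pvSfx i) := rfl
  have hmem : ∀ inv : String,
      decide (PySem.Str.slice inv (some i) none ∈ origC.map (pvSfx i))
        = PySem.Set.contains
            (PySem.Set.ofList (origC.map (fun cor => PySem.Str.slice cor (some i) none)))
            (PySem.Str.slice inv (some i) none) := by
    intro inv
    rw [hfun, pvContains_eq]
  unfold pvRoundStep pvAltRound
  simp only []
  rw [pvCorLoop]
  simp only [Prod.mk.injEq]
  refine ⟨?_, pvMap_sfx_succ' i hi origC, ?_⟩
  · rw [List.countP_eq_length_filter, List.filter_congr (fun x _ => hmem x)]
  · exact List.filter_congr (fun x _ => by rw [hmem x])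

-- ---- main equality ----

theorem pvMain (input : List String) : solve input = solve_alt input := by
  simp only [solve, solve_alt]
  obtain ⟨h1, h2⟩ := pvParse_eq input
  set C := (input.foldl pvParseStep ([], [], false)).1 with hC
  set L := (input.foldl pvParseStep ([], [], false)).2.1 with hL
  rw [← h1, ← h2]
  have hrange : PySem.List.pyRange 0 6 1 = [0, 1, 2, 3, 4, 5] := by decide
  rw [hrange]
  simp only [List.foldl_cons, List.foldl_nil]
  rw [show ((0 : Int), C, L) = ((0 : Int), C.map (pvSfx 0), L) by rw [pvMap_sfx_zero]]
  rw [pvRound_eq 0 (by norm_num) C L 0]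
  rw [show (0 : Int) + 1 = 1 by norm_num]
  rw [pvRound_eq 1 (by norm_num) C _ _]
  rw [show (1 : Int) + 1 = 2 by norm_num]
  rw [pvRound_eq 2 (by norm_num) C _ _]
  rw [show (2 : Int) + 1 = 3 by norm_num]
  rw [pvRound_eq 3 (by norm_num) C _ _]
  rw [show (3 : Int) + 1 = 4 by norm_num]
  rw [pvRound_eq 4 (by norm_num) C _ _]
  rw [show (4 : Int) + 1 = 5 by norm_num]
  rw [pvRound_eq 5 (by norm_num) C _ _]

-- ===== VERDICT (by name: the statement is the Claim_ definition above) =====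
theorem solve_spec : Claim_equal_solve := by
  intro input _
  unfold Spec_solve
  exact pvMain input
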